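-- pv_equiv track=rewrite | github.com/stoicswe/HTLM-Video-Parser | helper.py | find_item_by_quality
-- ===== SOURCE A (Python) =====
-- def can_convert_to_int(value):
--     try:
--         int(value)
--         return True
--     except (ValueError, TypeError):
--         return False
--
-- def find_item_by_quality(items_list, quality_value=1080):
--     highest_quality = 0
--     highest_quality_item = None
--     for item in items_list:
--         if item.get('quality') == str(quality_value):
--             return item
--         if (item.get('quality') != None):
--             if can_convert_to_int(item.get('quality')) and int(item.get('quality')) > highest_quality:
--                 highest_quality = int(item.get('quality'))
--                 highest_quality_item = item
--     return highest_quality_item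
-- ===== SOURCE B (Python) =====
-- def can_convert_to_int(value):
--     try:
--         int(value)
--         return True
--     except (ValueError, TypeError):
--         return False
--
-- def find_item_by_quality(items_list, quality_value=1080):
--     target = str(quality_value)
--     exact = next((it for it in items_list if it.get('quality') == target), None)
--     if exact is not None:
--         return exact
--     return max((it for it in items_list
--                 if can_convert_to_int(it.get('quality')) and int(it['quality']) > 0),
--                key=lambda it: int(it['quality']), default=None)
-- ===== Notes on version B (the rewrite author's own statement) =====
-- stated objective: idiomatic
-- what changed: Replaces A's single combined early-return loop carrying a (highest_quality, highest_quality_item) accumulator with a find-then-reduce decomposition: next() for the first exact match, else max(filtered generator, key=int quality, default=None).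
import Mathlib
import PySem

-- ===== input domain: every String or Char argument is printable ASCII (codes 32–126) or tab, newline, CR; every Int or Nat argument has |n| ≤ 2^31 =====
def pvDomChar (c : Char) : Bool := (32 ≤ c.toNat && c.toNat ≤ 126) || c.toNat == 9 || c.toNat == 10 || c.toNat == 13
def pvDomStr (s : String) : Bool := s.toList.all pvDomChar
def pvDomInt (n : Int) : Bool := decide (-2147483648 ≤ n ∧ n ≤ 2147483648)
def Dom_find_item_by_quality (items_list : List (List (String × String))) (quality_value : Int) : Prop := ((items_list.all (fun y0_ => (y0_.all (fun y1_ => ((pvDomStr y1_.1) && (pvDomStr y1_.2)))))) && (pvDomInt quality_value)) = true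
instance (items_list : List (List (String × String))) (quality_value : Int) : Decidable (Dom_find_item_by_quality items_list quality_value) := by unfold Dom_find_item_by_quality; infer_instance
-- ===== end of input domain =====

-- B replaces A's single combined early-return loop by a find-then-reduce decomposition
-- (first exact match, else max over positive-int-quality items); objective: idiomatic.


-- ===== PORT A =====
-- can_convert_to_int(value): int(None) raises TypeError → false; int(s) → ofStr?
def can_convert_to_int (value : Option String) : Bool :=
  match value with
  | none => false
  | some s => (PySem.Int.ofStr? s).isSome

-- the for-loop of A, carrying (highest_quality, highest_quality_item)
def fibqLoop (quality_value : Int) :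
    List (List (String × String)) → Int → Option (List (String × String)) →
    Option (List (String × String))
  | [], _, highest_quality_item => highest_quality_item
  | item :: rest, highest_quality, highest_quality_item =>
    if PySem.Dict.get? ⟨item⟩ "quality" = some (PySem.Int.toStr quality_value) then some item
    else
      match PySem.Dict.get? ⟨item⟩ "quality" with
      | none => fibqLoop quality_value rest highest_quality highest_quality_item
      | some s =>
        if can_convert_to_int (some s) && decide ((PySem.Int.ofStr? s).getD 0 > highest_quality)
        then fibqLoop quality_value rest ((PySem.Int.ofStr? s).getD 0) (some item)
        else fibqLoop quality_value rest highest_quality highest_quality_item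

def find_item_by_quality (items_list : List (List (String × String))) (quality_value : Int) : Option (List (String × String)) :=
  fibqLoop quality_value items_list 0 none

-- ===== PORT B =====
-- int(it['quality']) as B's max key (only evaluated on items that passed the filter)
def fibqKey (it : List (String × String)) : Int :=
  (PySem.Int.ofStr? ((PySem.Dict.get? ⟨it⟩ "quality").getD "")).getD 0

-- the generator's filter: can_convert_to_int(it.get('quality')) and int(it['quality']) > 0
def fibqPos (it : List (String × String)) : Bool :=
  can_convert_to_int (PySem.Dict.get? ⟨it⟩ "quality") && decide (fibqKey it > 0)

def find_item_by_quality_alt (items_list : List (List (String × String))) (quality_value : Int) : Option (List (String × String)) :=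
  let target := PySem.Int.toStr quality_value
  match items_list.find? (fun it => PySem.Dict.get? ⟨it⟩ "quality" == some target) with
  | some exact => some exact
  | none => PySem.List.max? (items_list.filter fibqPos) fibqKey

-- ===== PRECONDITION & SPEC =====
def Spec_find_item_by_quality (items_list : List (List (String × String))) (quality_value : Int) (out : Option (List (String × String))) : Prop := out = find_item_by_quality_alt items_list quality_value
instance (items_list : List (List (String × String))) (quality_value : Int) (out : Option (List (String × String))) : Decidable (Spec_find_item_by_quality items_list quality_value out) := by unfold Spec_find_item_by_quality; infer_instance

-- ===== CLAIM (what is proved, stated in full; the proofs are below) =====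
def Claim_equal_find_item_by_quality : Prop := ∀ (items_list : List (List (String × String))) (quality_value : Int), Dom_find_item_by_quality items_list quality_value → Spec_find_item_by_quality items_list quality_value (find_item_by_quality items_list quality_value)

-- ===== LEMMAS AND PROOFS =====

-- the step of PySem.List.max? specialised to fibqKey
def fibqStep (acc : Option (List (String × String))) (x : List (String × String)) :
    Option (List (String × String)) :=
  match acc with
  | none => some x
  | some m => if fibqKey m < fibqKey x then some x else some m

theorem fibqLoop_eq (quality_value : Int) (l : List (List (String × String)))
    (hq : Int) (hi : Option (List (String × String)))
    (hinv : (hi = none ∧ hq = 0) ∨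
            (∃ m, hi = some m ∧ fibqPos m = true ∧ hq = fibqKey m ∧ 0 < hq)) :
    fibqLoop quality_value l hq hi =
      match l.find? (fun it => PySem.Dict.get? ⟨it⟩ "quality" == some (PySem.Int.toStr quality_value)) with
      | some exact => some exact
      | none => (l.filter fibqPos).foldl fibqStep hi := by
  induction l generalizing hq hi with
  | nil => simp [fibqLoop]
  | cons item rest ih =>
    by_cases hexact : PySem.Dict.get? ⟨item⟩ "quality" = some (PySem.Int.toStr quality_value)
    · simp [fibqLoop, hexact, List.find?]
    · have hfind : (PySem.Dict.get? ⟨item⟩ "quality" == some (PySem.Int.toStr quality_value)) = false := by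
        simp [hexact]
      cases hget : PySem.Dict.get? ⟨item⟩ "quality" with
      | none =>
        have hp : fibqPos item = false := by
          simp [fibqPos, can_convert_to_int, hget]
        simp [fibqLoop, hget, List.find?, List.filter, hp]
        exact ih hq hi hinv
      | some s =>
        have hs : (s == PySem.Int.toStr quality_value) = false := by
          rw [hget] at hexact; simpa using hexact
        have hsne : ¬ (s = PySem.Int.toStr quality_value) := by simpa using hs
        cases hint : PySem.Int.ofStr? s with
        | none =>
          have hp : fibqPos item = false := by
            simp [fibqPos, can_convert_to_int, hget, hint]
          simp [fibqLoop, hget, hint, can_convert_to_int, List.find?, hs, hsne,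
            List.filter, hp]
          exact ih hq hi hinv
        | some n =>
          have hkey : fibqKey item = n := by simp [fibqKey, hget, hint]
          have hp : fibqPos item = decide (0 < n) := by
            simp [fibqPos, can_convert_to_int, hget, hint, hkey]
          by_cases hgt : n > hq
          · -- A updates the accumulator
            have hacc : fibqStep hi item = some item := by
              rcases hinv with ⟨h1, h2⟩ | ⟨m, h1, _, h3, _⟩
              · simp [fibqStep, h1]
              · subst h3
                simp [fibqStep, h1, hkey, hgt]
            have hpos : 0 < n := by
              rcases hinv with ⟨_, h2⟩ | ⟨m, _, _, _, h4⟩ <;> omega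
            have := ih n (some item) (Or.inr ⟨item, rfl, by simp [hp, hpos], hkey.symm, hpos⟩)
            simp [fibqLoop, hget, hint, can_convert_to_int, hgt, List.find?, hs, hsne,
              List.filter, hp, hpos, hacc] at this ⊢
            exact this
          · -- A keeps the accumulator; the filtered item (if any) loses the max? tie-break
            have := ih hq hi hinv
            by_cases hpos : 0 < n
            · have hacc : fibqStep hi item = hi := by
                rcases hinv with ⟨h1, h2⟩ | ⟨m, h1, _, h3, _⟩
                · omega
                · subst h3
                  have : ¬ fibqKey m < fibqKey item := by rw [hkey]; omega
                  simp [fibqStep, h1, this]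
              simp [fibqLoop, hget, hint, can_convert_to_int, hgt, List.find?, hs, hsne,
                List.filter, hp, hpos, hacc] at this ⊢
              exact this
            · simp [fibqLoop, hget, hint, can_convert_to_int, hgt, List.find?, hs, hsne,
                List.filter, hp, hpos] at this ⊢
              exact this

-- ===== VERDICT (by name: the statement is the Claim_ definition above) =====
theorem find_item_by_quality_spec : Claim_equal_find_item_by_quality := by
  intro items_list quality_value _
  unfold Spec_find_item_by_quality find_item_by_quality find_item_by_quality_alt
  rw [fibqLoop_eq quality_value items_list 0 none (Or.inl ⟨rfl, rfl⟩)]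
  cases hf : items_list.find? (fun it => PySem.Dict.get? ⟨it⟩ "quality" == some (PySem.Int.toStr quality_value))
  · simp only [hf, PySem.List.max?]
    congr 1
    funext acc x
    cases acc <;> rfl
  · simp only [hf]
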